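-- pv_equiv track=rewrite | github.com/Shuai-DaiDai/Guqin-Digitization-Core | apps/ocr-engine/src/ocr_engine/pipeline.py | _build_validation_summary
-- ===== SOURCE A (Python) =====
-- def _build_validation_summary(page_validations: list[dict[str, object]]) -> dict[str, object]:
--     total_expected = 0
--     total_detected = 0
--     pages_with_gap = 0
--     for page in page_validations:
--         expected = page.get("expected_glyph_box_count")
--         detected = page.get("detected_music_box_count")
--         gap = page.get("count_gap")
--         if isinstance(expected, int):
--             total_expected += expected
--         if isinstance(detected, int):
--             total_detected += detected
--         if isinstance(gap, int) and gap != 0: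
--             pages_with_gap += 1
--     return {
--         "page_count": len(page_validations),
--         "pages_with_count_gap": pages_with_gap,
--         "total_expected_glyph_boxes": total_expected,
--         "total_detected_music_boxes": total_detected,
--         "total_count_gap": total_detected - total_expected,
--     }
-- ===== SOURCE B (Python) =====
-- def _build_validation_summary(page_validations: list[dict[str, object]]) -> dict[str, object]:
--     # Divide-and-conquer: summarize halves as (expected, detected, pages_with_gap)
--     # triples and merge by componentwise addition; correct because each aggregate
--     # is additive over list concatenation.
--     def summarize(pages):
--         n = len(pages)
--         if n == 0:
--             return (0, 0, 0)
--         if n == 1: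
--             p = pages[0]
--             e = p.get("expected_glyph_box_count")
--             d = p.get("detected_music_box_count")
--             g = p.get("count_gap")
--             return (
--                 e if isinstance(e, int) else 0,
--                 d if isinstance(d, int) else 0,
--                 1 if isinstance(g, int) and g != 0 else 0,
--             )
--         m = n // 2
--         le, ld, lg = summarize(pages[:m])
--         re_, rd, rg = summarize(pages[m:])
--         return (le + re_, ld + rd, lg + rg)
--
--     total_expected, total_detected, pages_with_gap = summarize(page_validations)
--     return {
--         "page_count": len(page_validations),
--         "pages_with_count_gap": pages_with_gap,
--         "total_expected_glyph_boxes": total_expected,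
--         "total_detected_music_boxes": total_detected,
--         "total_count_gap": total_detected - total_expected,
--     }
-- ===== Notes on version B (the rewrite author's own statement) =====
-- stated objective: alternative
-- what changed: Replaced A's single linear loop with three accumulators by a divide-and-conquer recursion that summarizes each half of the page list as an (expected, detected, gap-pages) triple and merges halves by componentwise addition.
import Mathlib
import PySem

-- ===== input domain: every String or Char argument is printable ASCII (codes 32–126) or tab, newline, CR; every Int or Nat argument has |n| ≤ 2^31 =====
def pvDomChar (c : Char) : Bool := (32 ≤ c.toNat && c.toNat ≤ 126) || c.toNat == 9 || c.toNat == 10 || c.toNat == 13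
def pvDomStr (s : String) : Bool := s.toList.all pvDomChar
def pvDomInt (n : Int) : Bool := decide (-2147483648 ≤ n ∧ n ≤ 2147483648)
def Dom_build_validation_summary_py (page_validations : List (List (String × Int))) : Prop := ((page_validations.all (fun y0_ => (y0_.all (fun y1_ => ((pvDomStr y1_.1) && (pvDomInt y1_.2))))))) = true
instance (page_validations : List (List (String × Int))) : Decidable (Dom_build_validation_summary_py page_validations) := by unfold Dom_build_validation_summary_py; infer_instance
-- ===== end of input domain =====

-- B replaces A's single three-accumulator loop by a divide-and-conquer recursion that
-- summarizes halves as (expected, detected, gap-pages) triples and merges by addition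
-- (alternative decomposition; same O(n) cost).
-- Values in the dicts are Int by the type convention, so Python's isinstance(v, int)
-- corresponds to key presence.

-- ===== PORT A =====
-- one loop, three accumulators (total_expected, total_detected, pages_with_gap), as in A
def build_validation_summary_py (page_validations : List (List (String × Int))) : List (String × Int) :=
  let st := page_validations.foldl (fun (acc : Int × Int × Int) page =>
    let expected := List.lookup "expected_glyph_box_count" page   -- page.get(...)
    let detected := List.lookup "detected_music_box_count" page
    let gap := List.lookup "count_gap" page
    let te := match expected with | some v => acc.1 + v | none => acc.1
    let td := match detected with | some v => acc.2.1 + v | none => acc.2.1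
    let pg := match gap with
              | some v => if v ≠ 0 then acc.2.2 + 1 else acc.2.2
              | none => acc.2.2
    (te, td, pg)) (0, 0, 0)
  [("page_count", (page_validations.length : Int)),
   ("pages_with_count_gap", st.2.2),
   ("total_expected_glyph_boxes", st.1),
   ("total_detected_music_boxes", st.2.1),
   ("total_count_gap", st.2.1 - st.1)]

-- ===== PORT B =====
-- divide and conquer: summarize(pages) from Source B — halves merged by componentwise addition
def bvsSummarize : List (List (String × Int)) → Int × Int × Int
  | [] => (0, 0, 0)
  | [p] =>
      let e := List.lookup "expected_glyph_box_count" p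
      let d := List.lookup "detected_music_box_count" p
      let g := List.lookup "count_gap" p
      ((match e with | some v => v | none => 0),
       (match d with | some v => v | none => 0),
       (match g with | some v => if v ≠ 0 then (1 : Int) else 0 | none => 0))
  | p1 :: p2 :: rest =>
      -- m = n // 2 inlined (n = length of the whole list p1 :: p2 :: rest)
      let l := bvsSummarize ((p1 :: p2 :: rest).take ((p1 :: p2 :: rest).length / 2))
      let r := bvsSummarize ((p1 :: p2 :: rest).drop ((p1 :: p2 :: rest).length / 2))
      (l.1 + r.1, l.2.1 + r.2.1, l.2.2 + r.2.2)
  termination_by pages => pages.length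
  decreasing_by
  all_goals (simp [List.length_take, List.length_drop]; omega)

def build_validation_summary_py_alt (page_validations : List (List (String × Int))) : List (String × Int) :=
  let s := bvsSummarize page_validations
  [("page_count", (page_validations.length : Int)),
   ("pages_with_count_gap", s.2.2),
   ("total_expected_glyph_boxes", s.1),
   ("total_detected_music_boxes", s.2.1),
   ("total_count_gap", s.2.1 - s.1)]

-- ===== PRECONDITION & SPEC =====
def Spec_build_validation_summary_py (page_validations : List (List (String × Int))) (out : List (String × Int)) : Prop := out = build_validation_summary_py_alt page_validations
instance (page_validations : List (List (String × Int))) (out : List (String × Int)) : Decidable (Spec_build_validation_summary_py page_validations out) := by unfold Spec_build_validation_summary_py; infer_instance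

-- ===== CLAIM (what is proved, stated in full; the proofs are below) =====
def Claim_equal_build_validation_summary_py : Prop := ∀ (page_validations : List (List (String × Int))), Dom_build_validation_summary_py page_validations → Spec_build_validation_summary_py page_validations (build_validation_summary_py page_validations)

-- ===== LEMMAS AND PROOFS =====

-- the three aggregates, written as independent list functions (proof vocabulary)
def bvsE (l : List (List (String × Int))) : Int :=
  (l.filterMap (fun p => List.lookup "expected_glyph_box_count" p)).sum
def bvsD (l : List (List (String × Int))) : Int :=
  (l.filterMap (fun p => List.lookup "detected_music_box_count" p)).sum
def bvsG (l : List (List (String × Int))) : Int :=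
  (l.countP (fun p =>
    match List.lookup "count_gap" p with | some v => (v : Int) != 0 | none => false) : Int)

theorem bvs_foldl_char (l : List (List (String × Int))) (a b c : Int) :
    l.foldl (fun (acc : Int × Int × Int) page =>
      let expected := List.lookup "expected_glyph_box_count" page
      let detected := List.lookup "detected_music_box_count" page
      let gap := List.lookup "count_gap" page
      let te := match expected with | some v => acc.1 + v | none => acc.1
      let td := match detected with | some v => acc.2.1 + v | none => acc.2.1
      let pg := match gap with
                | some v => if v ≠ 0 then acc.2.2 + 1 else acc.2.2
                | none => acc.2.2
      (te, td, pg)) (a, b, c)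
    = (a + bvsE l, b + bvsD l, c + bvsG l) := by
  induction l generalizing a b c with
  | nil => simp [bvsE, bvsD, bvsG]
  | cons p t ih =>
    simp only [List.foldl_cons, ih, bvsE, bvsD, bvsG, List.filterMap_cons, List.countP_cons]
    rcases he : List.lookup "expected_glyph_box_count" p with _ | v <;>
    rcases hd : List.lookup "detected_music_box_count" p with _ | w <;>
    rcases hg : List.lookup "count_gap" p with _ | g <;>
      first
        | (by_cases hz : g = 0 <;> simp [hz, Prod.ext_iff] <;> omega)
        | (simp [Prod.ext_iff] <;> omega)

theorem bvsE_append (l r : List (List (String × Int))) : bvsE (l ++ r) = bvsE l + bvsE r := by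
  simp [bvsE]
theorem bvsD_append (l r : List (List (String × Int))) : bvsD (l ++ r) = bvsD l + bvsD r := by
  simp [bvsD]
theorem bvsG_append (l r : List (List (String × Int))) : bvsG (l ++ r) = bvsG l + bvsG r := by
  simp [bvsG, List.countP_append]

theorem bvsSummarize_char (l : List (List (String × Int))) :
    bvsSummarize l = (bvsE l, bvsD l, bvsG l) := by
  induction l using bvsSummarize.induct with
  | case1 => simp [bvsSummarize, bvsE, bvsD, bvsG]
  | case2 p =>
    simp only [bvsSummarize, bvsE, bvsD, bvsG, List.filterMap, List.countP, List.countP.go]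
    rcases he : List.lookup "expected_glyph_box_count" p with _ | v <;>
    rcases hd : List.lookup "detected_music_box_count" p with _ | w <;>
    rcases hg : List.lookup "count_gap" p with _ | g <;>
      first
        | (by_cases hz : g = 0 <;> simp [hz, Bool.cond_eq_ite, bne_iff_ne])
        | simp
  | case3 p1 p2 rest iht ihd =>
    rw [bvsSummarize]
    simp only [iht, ihd]
    set pages := p1 :: p2 :: rest with hp
    have h := List.take_append_drop (pages.length / 2) pages
    have hE := bvsE_append (pages.take (pages.length / 2)) (pages.drop (pages.length / 2))
    have hD := bvsD_append (pages.take (pages.length / 2)) (pages.drop (pages.length / 2))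
    have hG := bvsG_append (pages.take (pages.length / 2)) (pages.drop (pages.length / 2))
    rw [h] at hE hD hG
    simp [hE, hD, hG]

-- ===== VERDICT (by name: the statement is the Claim_ definition above) =====
theorem build_validation_summary_py_spec : Claim_equal_build_validation_summary_py := by
  intro pvs _
  unfold Spec_build_validation_summary_py build_validation_summary_py build_validation_summary_py_alt
  simp only [bvs_foldl_char, bvsSummarize_char, zero_add]
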